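-- pv_equiv track=rewrite | github.com/leehj24/Coding_Test | programmers/Level.0_py/099번.py | solution
-- ===== SOURCE A (Python) =====
-- def solution(arr, n):
--     answer = []
--     for i,j in enumerate(arr):
--         if len(arr)%2 !=0:
--             if i%2 ==0:
--                 answer.append(j+n)
--             else:
--                 answer.append(j)
--         if len(arr)%2 ==0:
--             if i%2 !=0:
--                 answer.append(j+n)
--             else:
--                 answer.append(j)
--     return answer
-- ===== SOURCE B (Python) =====
-- def solution(arr, n):
--     # copy, then bulk-update only the targeted parity positions by stride 2
--     answer = list(arr)
--     start = 0 if len(arr) % 2 else 1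
--     for i in range(start, len(arr), 2):
--         answer[i] += n
--     return answer
-- ===== Notes on version B (the rewrite author's own statement) =====
-- stated objective: simpler
-- what changed: Replaces the enumerate loop that re-tests length parity and index parity per element and appends one by one with a bulk copy of the list plus a strided in-place update (range(start, len, 2)) that touches only the targeted half of the positions.
import Mathlib
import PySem

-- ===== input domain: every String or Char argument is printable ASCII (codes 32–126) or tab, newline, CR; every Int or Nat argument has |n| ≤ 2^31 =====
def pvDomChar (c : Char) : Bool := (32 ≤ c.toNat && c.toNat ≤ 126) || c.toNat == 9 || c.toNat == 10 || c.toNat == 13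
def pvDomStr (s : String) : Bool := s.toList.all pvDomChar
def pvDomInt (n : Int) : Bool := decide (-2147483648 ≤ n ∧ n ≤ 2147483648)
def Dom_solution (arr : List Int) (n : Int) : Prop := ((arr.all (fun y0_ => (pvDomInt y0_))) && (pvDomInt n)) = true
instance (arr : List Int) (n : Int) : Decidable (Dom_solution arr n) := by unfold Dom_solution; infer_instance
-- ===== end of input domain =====

-- B replaces A's per-element parity branching with a bulk copy plus a strided in-place update of the targeted positions (simpler, same O(n)).

-- ===== PORT A =====
def solution (arr : List Int) (n : Int) : List Int :=
  (PySem.List.enumerate arr).foldl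
    (fun answer ij =>
      let answer := if (arr.length : Int) % 2 ≠ 0 then
          (if ij.1 % 2 = 0 then answer ++ [ij.2 + n] else answer ++ [ij.2])
        else answer
      if (arr.length : Int) % 2 = 0 then
          (if ij.1 % 2 ≠ 0 then answer ++ [ij.2 + n] else answer ++ [ij.2])
        else answer)
    []

-- ===== PORT B =====
def solution_alt (arr : List Int) (n : Int) : List Int :=
  let start : Int := if (arr.length : Int) % 2 ≠ 0 then 0 else 1
  (PySem.List.pyRange start (arr.length : Int) 2).foldl
    (fun answer i => answer.set i.toNat (PySem.List.pyGetD answer i 0 + n)) arr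

-- ===== PRECONDITION & SPEC =====
def Spec_solution (arr : List Int) (n : Int) (out : List Int) : Prop := out = solution_alt arr n
instance (arr : List Int) (n : Int) (out : List Int) : Decidable (Spec_solution arr n out) := by unfold Spec_solution; infer_instance

-- ===== CLAIM (what is proved, stated in full; the proofs are below) =====
def Claim_equal_solution : Prop := ∀ (arr : List Int) (n : Int), Dom_solution arr n → Spec_solution arr n (solution arr n)

-- ===== LEMMAS AND PROOFS =====

-- the value A appends for the pair (index, element), given the list length L
def pvG (L : Nat) (n : Int) (p : Int × Int) : Int :=
  p.2 + (if ((L : Int) + p.1) % 2 = 1 then n else 0)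

theorem pv_foldl_app {α β : Type} (g : α → β) :
    ∀ (l : List α) (acc : List β),
      l.foldl (fun acc x => acc ++ [g x]) acc = acc ++ l.map g := by
  intro l
  induction l with
  | nil => intro acc; simp
  | cons x xs ih => intro acc; simp [List.foldl_cons, ih]

theorem pv_solution_eq_map (arr : List Int) (n : Int) :
    solution arr n = (PySem.List.enumerate arr).map (pvG arr.length n) := by
  unfold solution
  have hstep :
      (fun (answer : List Int) (ij : Int × Int) =>
        let answer := if (arr.length : Int) % 2 ≠ 0 then
            (if ij.1 % 2 = 0 then answer ++ [ij.2 + n] else answer ++ [ij.2])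
          else answer
        if (arr.length : Int) % 2 = 0 then
            (if ij.1 % 2 ≠ 0 then answer ++ [ij.2 + n] else answer ++ [ij.2])
          else answer)
      = (fun (acc : List Int) (p : Int × Int) => acc ++ [pvG arr.length n p]) := by
    funext acc p
    simp only [pvG]
    have h1 : (arr.length : Int) % 2 = 0 ∨ (arr.length : Int) % 2 = 1 := by omega
    have h2 : p.1 % 2 = 0 ∨ p.1 % 2 = 1 := by omega
    rcases h1 with h1 | h1 <;> rcases h2 with h2 | h2 <;>
      simp [h1, h2] <;> (intro h; omega)
  rw [hstep, pv_foldl_app]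
  simp

theorem pv_foldl_set_getElem? (n : Int) :
    ∀ (is : List Int) (l : List Int), (∀ i ∈ is, 0 ≤ i) → ∀ (k : Nat),
      (is.foldl (fun ans i => ans.set i.toNat (PySem.List.pyGetD ans i 0 + n)) l)[k]?
        = l[k]?.map (fun x => x + (is.count (k : Int)) * n) := by
  intro is
  induction is with
  | nil =>
    intro l _ k
    simp
  | cons i is ih =>
    intro l hpos k
    have hposis : ∀ j ∈ is, 0 ≤ j := fun j hj => hpos j (List.mem_cons_of_mem _ hj)
    have hi : (0 : Int) ≤ i := hpos i List.mem_cons_self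
    rw [List.foldl_cons, ih _ hposis]
    by_cases hik : i = (k : Int)
    · have htn : i.toNat = k := by omega
      by_cases hk : k < l.length
      · have hget : PySem.List.pyGetD l i 0 = l[k] := by
          rw [PySem.List.pyGetD_of_nonneg l 0 hi, htn]
          simp [List.getD, List.getElem?_eq_getElem hk]
        rw [htn, hget, List.getElem?_set_self hk, List.getElem?_eq_getElem hk]
        simp only [Option.map_some]
        congr 1
        have hc : List.count ((k : Int)) (i :: is) = List.count ((k : Int)) is + 1 := by
          rw [List.count_cons]
          simp [hik]
        rw [hc]
        push_cast
        ring
      · have hnone : l[k]? = none := by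
          rw [List.getElem?_eq_none_iff]
          omega
        rw [htn, List.set_eq_of_length_le (by omega), hnone]
        simp
    · have hne : i.toNat ≠ k := by omega
      rw [List.getElem?_set_ne hne]
      congr 2
      funext x
      rw [List.count_cons]
      simp [hik]

theorem pv_nodup_pyRange_two (a b : Int) : (PySem.List.pyRange a b 2).Nodup := by
  rw [PySem.List.pyRange_of_pos a b (by norm_num)]
  apply List.Nodup.map
  · intro x y hxy
    simp only at hxy
    omega
  · exact List.nodup_range

-- elementwise value of B
theorem pv_alt_getElem? (arr : List Int) (n : Int) (k : Nat) :
    (solution_alt arr n)[k]? =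
      arr[k]?.map (fun x =>
        x + (if ((arr.length : Int) + (k : Int)) % 2 = 1 then n else 0)) := by
  unfold solution_alt
  set start : Int := if (arr.length : Int) % 2 ≠ 0 then 0 else 1 with hstart
  have hpos : ∀ i ∈ PySem.List.pyRange start (arr.length : Int) 2, 0 ≤ i := by
    intro i hi
    rw [PySem.List.mem_pyRange_iff_of_pos (by norm_num)] at hi
    have : 0 ≤ start := by rw [hstart]; split <;> norm_num
    omega
  rw [pv_foldl_set_getElem? n _ arr hpos k]
  rcases Nat.lt_or_ge k arr.length with hk | hk
  · have hcount : List.count ((k : Int)) (PySem.List.pyRange start (arr.length : Int) 2)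
        = if ((arr.length : Int) + (k : Int)) % 2 = 1 then 1 else 0 := by
      by_cases hmem : (k : Int) ∈ PySem.List.pyRange start (arr.length : Int) 2
      · rw [List.count_eq_one_of_mem (pv_nodup_pyRange_two _ _) hmem]
        rw [PySem.List.mem_pyRange_iff_of_pos (by norm_num)] at hmem
        obtain ⟨h1, h2, h3⟩ := hmem
        rw [if_pos]
        rw [hstart] at h1 h3
        by_cases hL : (arr.length : Int) % 2 = 0 <;> simp [hL] at h1 h3 <;> omega
      · rw [List.count_eq_zero_of_not_mem hmem]
        rw [PySem.List.mem_pyRange_iff_of_pos (by norm_num)] at hmem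
        rw [if_neg]
        intro hodd
        apply hmem
        rw [hstart]
        by_cases hL : (arr.length : Int) % 2 = 0 <;> simp [hL] <;> omega
    rw [hcount]
    congr 1
    funext x
    split_ifs <;> ring
  · rw [List.getElem?_eq_none_iff.mpr hk]
    simp

-- ===== VERDICT (by name: the statement is the Claim_ definition above) =====
theorem solution_spec : Claim_equal_solution := by
  intro arr n _
  unfold Spec_solution
  apply List.ext_getElem?
  intro k
  rw [pv_solution_eq_map, pv_alt_getElem?]
  rw [List.getElem?_map, PySem.List.getElem?_enumerate]
  rw [Option.map_map]
  congr 1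
  funext x
  simp [pvG]
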